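-- pv_equiv track=rewrite | github.com/charles1614/skills | skills/create-deepwiki/scripts/validate_docs.py | extract_content_outside_code_blocks
-- ===== SOURCE A (Python) =====
-- from typing import List, Dict, Any, Tuple
--
-- def extract_content_outside_code_blocks(content: str) -> Tuple[str, List[Tuple[int, int]]]:
--     """
--     Extract content outside of code blocks and return line mapping.
--     Returns the filtered content and list of (original_line, filtered_line) tuples.
--     """
--     lines = content.split('\n')
--     filtered_lines = []
--     line_mapping = []  # Maps filtered line index to original line number
--     in_code_block = False
--
--     for i, line in enumerate(lines):
--         stripped = line.strip()
--         if stripped.startswith('```'):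
--             in_code_block = not in_code_block
--             filtered_lines.append('')  # Keep line for counting but empty
--             line_mapping.append(i + 1)
--         elif not in_code_block:
--             filtered_lines.append(line)
--             line_mapping.append(i + 1)
--         else:
--             filtered_lines.append('')  # Keep line for counting but empty
--             line_mapping.append(i + 1)
--
--     return '\n'.join(filtered_lines), line_mapping
-- ===== SOURCE B (Python) =====
-- def _next_fence(lines, start):
--     """Index of the first fence line at or after start, or None."""
--     for i in range(start, len(lines)):
--         if lines[i].strip().startswith('```'):
--             return i
--     return None
--
--
-- def extract_content_outside_code_blocks(content):
--     lines = content.split('\n')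
--     out = []
--     pos = 0
--     while True:
--         j = _next_fence(lines, pos)
--         if j is None:
--             out.extend(lines[pos:])          # tail with no fences: kept verbatim
--             break
--         out.extend(lines[pos:j])             # text before the opening fence
--         out.append('')                       # the opening fence itself
--         k = _next_fence(lines, j + 1)
--         if k is None:
--             out.extend([''] * (len(lines) - j - 1))   # unmatched fence: blank to EOF
--             break
--         out.extend([''] * (k - j))           # block body and closing fence
--         pos = k + 1
--     return '\n'.join(out), [i + 1 for i in range(len(lines))]
-- ===== Notes on version B (the rewrite author's own statement) =====
-- stated objective: alternative
-- what changed: Replaces A's line-by-line enumerate loop with an in_code_block boolean by a fence-to-fence jumping loop: repeatedly locate the next fence, copy the preceding lines verbatim via bulk slicing, blank through the matching fence (or to EOF if unmatched), and emit the line mapping as a single range(len(lines)) comprehension instead of per-branch appends.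
import Mathlib
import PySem

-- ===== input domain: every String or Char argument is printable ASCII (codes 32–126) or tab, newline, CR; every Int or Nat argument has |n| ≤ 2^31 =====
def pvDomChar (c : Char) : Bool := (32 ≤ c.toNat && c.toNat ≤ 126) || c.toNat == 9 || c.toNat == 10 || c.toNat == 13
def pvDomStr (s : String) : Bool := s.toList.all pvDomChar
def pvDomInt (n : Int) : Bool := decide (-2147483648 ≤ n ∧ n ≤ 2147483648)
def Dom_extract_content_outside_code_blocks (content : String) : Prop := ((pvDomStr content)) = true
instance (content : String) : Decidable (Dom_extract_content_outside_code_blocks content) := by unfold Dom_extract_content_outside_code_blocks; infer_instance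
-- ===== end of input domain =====

-- B replaces A's per-line in_code_block state machine by fence-to-fence jumps: find the
-- next fence, copy the text up to it, blank through the matching fence (or to EOF), repeat;
-- objective: alternative decomposition, same cost.

-- ===== PORT A =====
-- is this line a code fence? (line.strip().startswith('```'))
def pvFence (l : String) : Bool := PySem.Str.startswith (PySem.Str.strip l) "```"

-- content.split('\n'): sep is the non-empty literal '\n', so split? is always some
def pvSplitNl (content : String) : List String := (PySem.Str.split? content "\n").getD []

-- the enumerate loop of A: state = (current index i, in_code_block), appends to both lists
def goA : List String → Int → Bool → List String × List Int
  | [], _, _ => ([], [])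
  | line :: ls, i, b =>
    if pvFence line then
      let r := goA ls (i + 1) (!b)
      ("" :: r.1, (i + 1) :: r.2)
    else if !b then
      let r := goA ls (i + 1) b
      (line :: r.1, (i + 1) :: r.2)
    else
      let r := goA ls (i + 1) b
      ("" :: r.1, (i + 1) :: r.2)

def extract_content_outside_code_blocks (content : String) : String × List Int :=
  let lines := pvSplitNl content
  let r := goA lines 0 false
  (PySem.Str.join "\n" r.1, r.2)

-- ===== PORT B =====
-- B's loop over the remaining suffix: copy until the next fence, blank through the
-- matching fence (to EOF if unmatched), recurse on the rest
def goB (rest : List String) : List String :=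
  match h : rest.findIdx? pvFence with
  | none => rest
  | some j =>
    let rest1 := rest.drop (j + 1)
    match rest1.findIdx? pvFence with
    | none => rest.take j ++ [""] ++ List.replicate rest1.length ""
    | some k => rest.take j ++ [""] ++ List.replicate (k + 1) "" ++ goB (rest1.drop (k + 1))
termination_by rest.length
decreasing_by
  cases rest with
  | nil => simp at h
  | cons a as => simp only [List.length_drop, List.length_cons]; omega

def extract_content_outside_code_blocks_alt (content : String) : String × List Int :=
  let lines := pvSplitNl content
  (PySem.Str.join "\n" (goB lines), (List.range lines.length).map (fun i : Nat => (i : Int) + 1))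

-- ===== PRECONDITION & SPEC =====
def Spec_extract_content_outside_code_blocks (content : String) (out : String × List Int) : Prop := out = extract_content_outside_code_blocks_alt content
instance (content : String) (out : String × List Int) : Decidable (Spec_extract_content_outside_code_blocks content out) := by unfold Spec_extract_content_outside_code_blocks; infer_instance

-- ===== CLAIM (what is proved, stated in full; the proofs are below) =====
def Claim_equal_extract_content_outside_code_blocks : Prop := ∀ (content : String), Dom_extract_content_outside_code_blocks content → Spec_extract_content_outside_code_blocks content (extract_content_outside_code_blocks content)

-- ===== LEMMAS AND PROOFS =====

-- goA's first component does not depend on the running index i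
theorem goA_fst_idx (ls : List String) : ∀ (i i' : Int) (b : Bool),
    (goA ls i b).1 = (goA ls i' b).1 := by
  induction ls with
  | nil => intro i i' b; rfl
  | cons l ls ih =>
    intro i i' b
    simp only [goA]
    split_ifs <;> simp [ih (i + 1) (i' + 1)]

-- goA's second component is just 1-based line numbers
theorem goA_snd (ls : List String) : ∀ (i : Int) (b : Bool),
    (goA ls i b).2 = (List.range ls.length).map (fun k : Nat => i + (k : Int) + 1) := by
  induction ls with
  | nil => intro i b; rfl
  | cons l ls ih =>
    intro i b
    have htail : ∀ (b' : Bool),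
        (i + 1) :: (goA ls (i + 1) b').2
          = (List.range (l :: ls).length).map (fun k : Nat => i + (k : Int) + 1) := by
      intro b'
      rw [ih, List.length_cons, List.range_succ_eq_map, List.map_cons, List.map_map]
      congr 1
      · push_cast; ring
      · refine List.map_congr_left ?_
        intro k _
        simp only [Function.comp_apply]
        push_cast
        ring
    simp only [goA]
    split_ifs <;> exact htail _

-- no fence in ls: outside a block everything is kept
theorem goA_none_false (ls : List String) (h : ∀ x ∈ ls, pvFence x = false) :
    ∀ (i : Int), (goA ls i false).1 = ls := by
  induction ls with
  | nil => intro i; rfl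
  | cons l ls ih =>
    intro i
    have hf : pvFence l = false := h l (List.mem_cons_self ..)
    have ht : ∀ x ∈ ls, pvFence x = false := fun x hx => h x (List.mem_cons_of_mem _ hx)
    simp [goA, hf, ih ht]

-- no fence in ls: inside a block everything is blanked
theorem goA_none_true (ls : List String) (h : ∀ x ∈ ls, pvFence x = false) :
    ∀ (i : Int), (goA ls i true).1 = List.replicate ls.length "" := by
  induction ls with
  | nil => intro i; rfl
  | cons l ls ih =>
    intro i
    have hf : pvFence l = false := h l (List.mem_cons_self ..)
    have ht : ∀ x ∈ ls, pvFence x = false := fun x hx => h x (List.mem_cons_of_mem _ hx)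
    simp [goA, hf, List.replicate_succ, ih ht]

-- first fence at j, outside a block: keep up to it, blank it, continue inside
set_option maxHeartbeats 1000000 in
theorem goA_some_false (ls : List String) : ∀ (j : Nat),
    ls.findIdx? pvFence = some j → ∀ (i : Int),
    (goA ls i false).1 = ls.take j ++ [""] ++ (goA (ls.drop (j + 1)) 0 true).1 := by
  induction ls with
  | nil => intro j h; simp at h
  | cons l ls ih =>
    intro j h i
    rw [List.findIdx?_cons] at h
    by_cases hf : pvFence l
    · rw [if_pos hf] at h
      cases h
      simp [goA, hf, goA_fst_idx ls (i + 1) 0]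
    · rw [if_neg hf] at h
      rw [Option.map_eq_some_iff] at h
      obtain ⟨j', hj', hj⟩ := h
      subst hj
      simp [goA, hf, ih j' hj']

-- first fence at j, inside a block: blank through it, continue outside
set_option maxHeartbeats 1000000 in
theorem goA_some_true (ls : List String) : ∀ (j : Nat),
    ls.findIdx? pvFence = some j → ∀ (i : Int),
    (goA ls i true).1 = List.replicate (j + 1) "" ++ (goA (ls.drop (j + 1)) 0 false).1 := by
  induction ls with
  | nil => intro j h; simp at h
  | cons l ls ih =>
    intro j h i
    rw [List.findIdx?_cons] at h
    by_cases hf : pvFence l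
    · rw [if_pos hf] at h
      cases h
      simp [goA, hf, goA_fst_idx ls (i + 1) 0]
    · rw [if_neg hf] at h
      rw [Option.map_eq_some_iff] at h
      obtain ⟨j', hj', hj⟩ := h
      subst hj
      simp [goA, hf, ih j' hj', List.replicate_succ]

-- the two filtered-line computations agree
set_option maxHeartbeats 1000000 in
theorem goA_eq_goB (ls : List String) : (goA ls 0 false).1 = goB ls := by
  fun_induction goB ls with
  | case1 rest h =>
    exact goA_none_false rest (List.findIdx?_eq_none_iff.mp h) 0
  | case2 rest j h rest1 h2 =>
    rw [goA_some_false rest j h 0, goA_none_true _ (List.findIdx?_eq_none_iff.mp h2)]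
  | case3 rest j h rest1 k h2 ih =>
    rw [goA_some_false rest j h 0, goA_some_true _ k h2 0, ih]
    simp

-- ===== VERDICT (by name: the statement is the Claim_ definition above) =====
theorem extract_content_outside_code_blocks_spec : Claim_equal_extract_content_outside_code_blocks := by
  intro content _
  unfold Spec_extract_content_outside_code_blocks extract_content_outside_code_blocks extract_content_outside_code_blocks_alt
  simp only [goA_eq_goB, goA_snd]
  refine congrArg _ (List.map_congr_left ?_)
  intro k _
  omega
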